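-- pv_equiv track=rewrite | github.com/austwel/advent-of-code | 2023/python/14/14.py | create_state
-- ===== SOURCE A (Python) =====
-- def create_state(boulders: list[tuple[int, int]], rows: int, cols: int):
--     ret = ''
--     boulder_s = set(boulders)
--     for i in range(rows):
--         for j in range(cols):
--             if (i, j) in boulder_s:
--                 ret += '1'
--             else:
--                 ret += '0'
--     return ret
-- ===== SOURCE B (Python) =====
-- def create_state(boulders: list[tuple[int, int]], rows: int, cols: int):
--     size = rows * cols if rows > 0 and cols > 0 else 0
--     buf = ['0'] * size
--     for i, j in boulders:
--         if 0 <= i < rows and 0 <= j < cols: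
--             buf[i * cols + j] = '1'
--     return ''.join(buf)
-- ===== Notes on version B (the rewrite author's own statement) =====
-- stated objective: faster
-- what changed: Instead of scanning every grid cell and testing set membership, B allocates a '0' buffer of rows*cols and loops over the boulders only, writing '1' at each in-bounds boulder's flat index.
import Mathlib
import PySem

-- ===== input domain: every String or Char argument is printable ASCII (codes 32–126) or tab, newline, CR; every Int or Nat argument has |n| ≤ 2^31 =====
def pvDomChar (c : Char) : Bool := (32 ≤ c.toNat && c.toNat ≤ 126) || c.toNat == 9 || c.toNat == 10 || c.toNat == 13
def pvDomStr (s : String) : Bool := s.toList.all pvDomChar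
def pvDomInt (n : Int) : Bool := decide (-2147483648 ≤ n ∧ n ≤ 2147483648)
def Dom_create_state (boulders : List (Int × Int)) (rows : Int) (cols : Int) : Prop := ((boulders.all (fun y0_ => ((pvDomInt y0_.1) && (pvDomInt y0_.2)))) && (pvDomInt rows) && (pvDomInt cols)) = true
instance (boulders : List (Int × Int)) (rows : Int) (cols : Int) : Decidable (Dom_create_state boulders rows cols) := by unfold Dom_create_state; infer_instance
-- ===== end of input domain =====

-- B replaces A's cell-by-cell set-membership scan by writing '1' into a preallocated
-- '0' buffer at each in-bounds boulder's flat index (objective: faster, constant factor).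

-- ===== PORT A =====
-- Strings are modelled as List Char and wrapped with String.mk at the end
-- (exact for the abstract sequence of characters A builds).
def create_state (boulders : List (Int × Int)) (rows : Int) (cols : Int) : String :=
  let boulder_s := PySem.Set.ofList boulders
  String.mk ((PySem.List.pyRange 0 rows).foldl (fun ret i =>
    (PySem.List.pyRange 0 cols).foldl (fun ret j =>
      if (i, j) ∈ boulder_s then ret ++ ['1'] else ret ++ ['0']) ret) [])

-- ===== PORT B =====
def create_state_alt (boulders : List (Int × Int)) (rows : Int) (cols : Int) : String :=
  let size : Nat := if 0 < rows ∧ 0 < cols then (rows * cols).toNat else 0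
  let buf := List.replicate size '0'
  String.mk (boulders.foldl (fun buf p =>
    if 0 ≤ p.1 ∧ p.1 < rows ∧ 0 ≤ p.2 ∧ p.2 < cols then
      buf.set (p.1 * cols + p.2).toNat '1'
    else buf) buf)

-- ===== PRECONDITION & SPEC =====
def Spec_create_state (boulders : List (Int × Int)) (rows : Int) (cols : Int) (out : String) : Prop := out = create_state_alt boulders rows cols
instance (boulders : List (Int × Int)) (rows : Int) (cols : Int) (out : String) : Decidable (Spec_create_state boulders rows cols out) := by unfold Spec_create_state; infer_instance

-- ===== CLAIM (what is proved, stated in full; the proofs are below) =====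
def Claim_equal_create_state : Prop := ∀ (boulders : List (Int × Int)) (rows : Int) (cols : Int), Dom_create_state boulders rows cols → Spec_create_state boulders rows cols (create_state boulders rows cols)

-- ===== LEMMAS AND PROOFS =====

-- the canonical grid, indexed row-major over naturals
def pvCell (boulders : List (Int × Int)) (cols : Int) (k : Nat) : Char :=
  if ((((k / cols.toNat : Nat) : Int), ((k % cols.toNat : Nat) : Int)) ∈ boulders) then '1' else '0'

def pvGrid (boulders : List (Int × Int)) (rows cols : Int) : List Char :=
  (List.range (rows.toNat * cols.toNat)).map (pvCell boulders cols)

-- row-by-row concatenation equals the row-major indexed map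
theorem pv_range_flatMap {α : Type} (f : Nat → Nat → α) (C : Nat) : ∀ (R : Nat),
    (List.range R).flatMap (fun i => (List.range C).map (fun j => f i j))
      = (List.range (R * C)).map (fun k => f (k / C) (k % C)) := by
  intro R
  induction R with
  | zero => simp
  | succ R ih =>
    rw [List.range_succ, List.flatMap_append, ih, Nat.succ_mul, List.range_add,
        List.map_append]
    congr 1
    simp only [List.flatMap_cons, List.flatMap_nil, List.append_nil, List.map_map]
    apply List.map_congr_left
    intro x hx
    have hxC : x < C := List.mem_range.mp hx
    have hC : 0 < C := by omega
    have h1 : (R * C + x) / C = R := by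
      rw [Nat.mul_comm R C, Nat.mul_add_div hC, Nat.div_eq_of_lt hxC]; omega
    have h2 : (R * C + x) % C = x := by
      rw [Nat.mul_comm R C, Nat.mul_add_mod, Nat.mod_eq_of_lt hxC]
    simp [h1, h2]


-- A builds the canonical grid cell by cell
theorem pvA_eq_grid (boulders : List (Int × Int)) (rows cols : Int) :
    create_state boulders rows cols = String.mk (pvGrid boulders rows cols) := by
  dsimp only [create_state]
  have hin : (fun (ret : List Char) (i : Int) =>
      (PySem.List.pyRange 0 cols).foldl (fun ret j =>
        if (i, j) ∈ PySem.Set.ofList boulders then ret ++ ['1'] else ret ++ ['0']) ret)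
    = (fun ret i => ret ++ (PySem.List.pyRange 0 cols).map
        (fun j => if (i, j) ∈ boulders then '1' else '0')) := by
    funext ret i
    have : (fun (ret : List Char) (j : Int) =>
        if (i, j) ∈ PySem.Set.ofList boulders then ret ++ ['1'] else ret ++ ['0'])
      = (fun ret j => ret ++ [if (i, j) ∈ boulders then '1' else '0']) := by
      funext ret j
      by_cases h : (i, j) ∈ boulders <;>
        simp [PySem.Set.mem_ofList, h]
    rw [this, PySem.List.foldl_append_singleton_eq_map]
  rw [hin, PySem.List.foldl_append_eq_flatMap]
  simp only [List.nil_append, PySem.List.pyRange_zero, List.flatMap_map, List.map_map]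
  simp only [Function.comp_def]
  rw [pv_range_flatMap (fun i j => if ((i:Int), (j:Int)) ∈ boulders then '1' else '0')]
  rfl

-- the fold writes '1' exactly at the flat indices of in-bounds boulders
theorem pv_foldl_getElem? (rows cols : Int) :
    ∀ (bs : List (Int × Int)) (buf : List Char) (k : Nat),
    (bs.foldl (fun buf p =>
        if 0 ≤ p.1 ∧ p.1 < rows ∧ 0 ≤ p.2 ∧ p.2 < cols then
          buf.set (p.1 * cols + p.2).toNat '1'
        else buf) buf)[k]? =
      if bs.any (fun p => decide (0 ≤ p.1 ∧ p.1 < rows ∧ 0 ≤ p.2 ∧ p.2 < cols)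
          && ((p.1 * cols + p.2).toNat == k)) then
        (if k < buf.length then some '1' else none)
      else buf[k]? := by
  intro bs
  induction bs with
  | nil => intro buf k; simp
  | cons p bs ih =>
    intro buf k
    rw [List.foldl_cons, ih, List.any_cons]
    by_cases hb : 0 ≤ p.1 ∧ p.1 < rows ∧ 0 ≤ p.2 ∧ p.2 < cols
    · rw [if_pos hb]
      by_cases hk : (p.1 * cols + p.2).toNat = k
      · have hc : (decide (0 ≤ p.1 ∧ p.1 < rows ∧ 0 ≤ p.2 ∧ p.2 < cols)
            && ((p.1 * cols + p.2).toNat == k)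
            || bs.any (fun p => decide (0 ≤ p.1 ∧ p.1 < rows ∧ 0 ≤ p.2 ∧ p.2 < cols)
                && ((p.1 * cols + p.2).toNat == k))) = true := by
          simp [hb, hk]
        rw [hc, if_pos rfl, List.length_set]
        rcases ha : bs.any (fun p => decide (0 ≤ p.1 ∧ p.1 < rows ∧ 0 ≤ p.2 ∧ p.2 < cols)
            && ((p.1 * cols + p.2).toNat == k)) with _ | _
        · simp [List.getElem?_set, hk]
        · simp
      · have hc : (decide (0 ≤ p.1 ∧ p.1 < rows ∧ 0 ≤ p.2 ∧ p.2 < cols)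
            && ((p.1 * cols + p.2).toNat == k)
            || bs.any (fun p => decide (0 ≤ p.1 ∧ p.1 < rows ∧ 0 ≤ p.2 ∧ p.2 < cols)
                && ((p.1 * cols + p.2).toNat == k)))
            = bs.any (fun p => decide (0 ≤ p.1 ∧ p.1 < rows ∧ 0 ≤ p.2 ∧ p.2 < cols)
                && ((p.1 * cols + p.2).toNat == k)) := by
          simp [hk]
        rw [hc, List.length_set]
        rcases ha : bs.any (fun p => decide (0 ≤ p.1 ∧ p.1 < rows ∧ 0 ≤ p.2 ∧ p.2 < cols)
            && ((p.1 * cols + p.2).toNat == k)) with _ | _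
        · simp [List.getElem?_set, hk]
        · simp
    · rw [if_neg hb]
      have hc : decide (0 ≤ p.1 ∧ p.1 < rows ∧ 0 ≤ p.2 ∧ p.2 < cols) = false := by
        simp [hb]
      rw [hc, Bool.false_and, Bool.false_or]


-- a cell holds an in-bounds boulder iff its (row, col) pair is a boulder
theorem pv_any_iff (boulders : List (Int × Int)) (rows cols : Int)
    (hr : 0 < rows) (hc : 0 < cols) (k : Nat) (hk : k < rows.toNat * cols.toNat) :
    (boulders.any (fun p => decide (0 ≤ p.1 ∧ p.1 < rows ∧ 0 ≤ p.2 ∧ p.2 < cols)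
        && ((p.1 * cols + p.2).toNat == k)) = true)
      ↔ ((((k / cols.toNat : Nat) : Int), ((k % cols.toNat : Nat) : Int)) ∈ boulders) := by
  have hC : 0 < cols.toNat := by omega
  rw [List.any_eq_true]
  constructor
  · rintro ⟨p, hmem, hp⟩
    simp only [Bool.and_eq_true, decide_eq_true_eq, beq_iff_eq] at hp
    obtain ⟨⟨h1, h2, h3, h4⟩, hidx⟩ := hp
    set a := p.1.toNat with ha
    set b := p.2.toNat with hb
    have hp1 : p.1 = (a : Int) := by omega
    have hp2 : p.2 = (b : Int) := by omega
    have hbC : b < cols.toNat := by omega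
    have hidx' : a * cols.toNat + b = k := by
      rw [hp1, hp2] at hidx
      have : ((a : Int) * cols + (b : Int)) = ((a * cols.toNat + b : Nat) : Int) := by
        push_cast
        rw [Int.toNat_of_nonneg (by omega : (0:Int) ≤ cols)]
      rw [this, Int.toNat_natCast] at hidx
      exact hidx
    have hdiv : k / cols.toNat = a := by
      rw [← hidx', Nat.mul_comm, Nat.mul_add_div hC, Nat.div_eq_of_lt hbC]
      omega
    have hmod : k % cols.toNat = b := by
      rw [← hidx', Nat.mul_comm, Nat.mul_add_mod, Nat.mod_eq_of_lt hbC]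
    rw [hdiv, hmod, ← hp1, ← hp2]
    exact hmem
  · intro hmem
    refine ⟨_, hmem, ?_⟩
    simp only [Bool.and_eq_true, decide_eq_true_eq, beq_iff_eq]
    have hdivR : k / cols.toNat < rows.toNat := by
      rw [Nat.div_lt_iff_lt_mul hC]
      calc k < rows.toNat * cols.toNat := hk
        _ = _ := by ring
    have hmodC : k % cols.toNat < cols.toNat := Nat.mod_lt _ hC
    refine ⟨⟨by positivity, ?_, by positivity, ?_⟩, ?_⟩
    · omega
    · omega
    · have : ((k / cols.toNat : Nat) : Int) * cols + ((k % cols.toNat : Nat) : Int)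
          = ((k / cols.toNat * cols.toNat + k % cols.toNat : Nat) : Int) := by
        push_cast
        rw [Int.toNat_of_nonneg (by omega : (0:Int) ≤ cols)]
      rw [this, Int.toNat_natCast, Nat.div_add_mod']


-- B's buffer ends up as the canonical grid
theorem pvB_eq_grid (boulders : List (Int × Int)) (rows cols : Int) :
    create_state_alt boulders rows cols = String.mk (pvGrid boulders rows cols) := by
  dsimp only [create_state_alt]
  by_cases hpos : 0 < rows ∧ 0 < cols
  · rw [if_pos hpos]
    have hsz : (rows * cols).toNat = rows.toNat * cols.toNat := by
      rcases hpos with ⟨hr, hc⟩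
      rw [show rows * cols = ((rows.toNat * cols.toNat : Nat) : Int) from by
        push_cast; rw [Int.toNat_of_nonneg (by omega : (0:Int) ≤ rows),
          Int.toNat_of_nonneg (by omega : (0:Int) ≤ cols)], Int.toNat_natCast]
    rw [hsz]
    congr 1
    apply List.ext_getElem?
    intro k
    rw [pv_foldl_getElem? rows cols boulders _ k]
    simp only [List.length_replicate, List.getElem?_replicate]
    by_cases hk : k < rows.toNat * cols.toNat
    · have hgrid : (pvGrid boulders rows cols)[k]? = some (pvCell boulders cols k) := by
        unfold pvGrid
        rw [List.getElem?_map, List.getElem?_range hk]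
        rfl
      rw [hgrid]
      unfold pvCell
      by_cases hmem : ((((k / cols.toNat : Nat) : Int), ((k % cols.toNat : Nat) : Int)) ∈ boulders)
      · rw [if_pos ((pv_any_iff boulders rows cols hpos.1 hpos.2 k hk).mpr hmem), if_pos hk,
          if_pos hmem]
      · rw [if_neg (by rw [pv_any_iff boulders rows cols hpos.1 hpos.2 k hk]; exact hmem),
          if_pos hk, if_neg hmem]
    · have hgrid : (pvGrid boulders rows cols)[k]? = none := by
        unfold pvGrid
        rw [List.getElem?_eq_none]
        simp; omega
      rw [hgrid]
      split <;> simp [hk]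
  · rw [if_neg hpos]
    have hnil : ∀ (bs : List (Int × Int)), (bs.foldl (fun buf p =>
        if 0 ≤ p.1 ∧ p.1 < rows ∧ 0 ≤ p.2 ∧ p.2 < cols then
          buf.set (p.1 * cols + p.2).toNat '1'
        else buf) ([] : List Char)) = [] := by
      intro bs
      induction bs with
      | nil => rfl
      | cons p bs ih => rw [List.foldl_cons]; split <;> simpa using ih
    have hRC : rows.toNat * cols.toNat = 0 := by
      rcases Decidable.not_and_iff_not_or_not.mp hpos with h | h
      · have h0 : rows.toNat = 0 := by omega
        simp [h0]
      · have h0 : cols.toNat = 0 := by omega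
        simp [h0]
    simp [pvGrid, hRC, hnil]

-- ===== VERDICT (by name: the statement is the Claim_ definition above) =====
theorem create_state_spec : Claim_equal_create_state := by
  intro boulders rows cols _
  unfold Spec_create_state
  rw [pvA_eq_grid, pvB_eq_grid]
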